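-- pv_equiv track=rewrite | github.com/Inusette/Advent-of-Code | Advent_2015/Day1/Day1_2015.py | find_basement_position
-- ===== SOURCE A (Python) =====
-- def find_basement_position(directions):
--     """
--     finds the position of the symbol that makes the destination number negative
--     :param directions: input string
--     :return: the position - int
--     """
--
--     # create the number for the destination floor
--     destination = 0
--
--     # create the position tracker
--     position = 1
--
--     # iterate over the symbols in the input file
--     for s in range(len(directions)):
--
--         # increment the destination if '(' occurs
--         if directions[s] == '(':
--             destination += 1
--
--         # reduce the destination if ')' occurs
--         if directions[s] == ')':
--             destination += -1
--
--         # if the destination reaches the basement, break out of the loop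
--         if destination == -1:
--             break
--
--         # increment the position
--         position += 1
--
--     return position
-- ===== SOURCE B (Python) =====
-- def find_basement_position(directions):
--     # decompose: map to deltas, build prefix-sum table, then search it for -1
--     deltas = [1 if c == '(' else -1 if c == ')' else 0 for c in directions]
--     prefix = []
--     total = 0
--     for d in deltas:
--         total += d
--         prefix.append(total)
--     idx = prefix.index(-1) if -1 in prefix else len(directions)
--     return idx + 1
-- ===== Notes on version B (the rewrite author's own statement) =====
-- stated objective: alternative
-- what changed: A fuses accumulation, test and early break in one loop; B first builds the whole prefix-sum table from a delta map and then searches it for -1 with index()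
import Mathlib
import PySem

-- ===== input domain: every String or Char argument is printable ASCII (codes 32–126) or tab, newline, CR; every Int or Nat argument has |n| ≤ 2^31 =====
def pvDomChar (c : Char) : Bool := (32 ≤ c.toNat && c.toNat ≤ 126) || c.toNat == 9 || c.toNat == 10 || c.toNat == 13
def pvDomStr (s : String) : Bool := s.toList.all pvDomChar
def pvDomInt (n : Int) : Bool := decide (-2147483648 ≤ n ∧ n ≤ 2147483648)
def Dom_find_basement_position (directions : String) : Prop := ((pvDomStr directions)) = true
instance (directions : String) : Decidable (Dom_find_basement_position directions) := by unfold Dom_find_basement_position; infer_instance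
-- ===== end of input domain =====

-- B builds the whole prefix-sum table from a delta map and then searches it for -1,
-- instead of A's fused accumulate-test-break loop; same cost, different decomposition.

-- ===== PORT A =====
-- A's for-loop with break, as structural recursion over the characters with state (destination, position)
def pvLoopA : List Char → Int → Int → Int
  | [], _, pos => pos
  | c :: rest, dest, pos =>
    let dest1 := if c = '(' then dest + 1 else dest
    let dest2 := if c = ')' then dest1 - 1 else dest1
    if dest2 = -1 then pos else pvLoopA rest dest2 (pos + 1)

def find_basement_position (directions : String) : Int :=
  pvLoopA directions.toList 0 1

-- ===== PORT B =====
-- deltas = [1 if '(' else -1 if ')' else 0 for c in directions]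
def pvDeltas (cs : List Char) : List Int :=
  cs.map (fun c => if c = '(' then 1 else if c = ')' then -1 else 0)

-- the prefix-sum loop building 'prefix' from a running total
def pvPrefix : List Int → Int → List Int
  | [], _ => []
  | d :: rest, total => (total + d) :: pvPrefix rest (total + d)

def find_basement_position_alt (directions : String) : Int :=
  let pfx := pvPrefix (pvDeltas directions.toList) 0
  let idx : Int :=
    if (-1 : Int) ∈ pfx then
      match PySem.List.index? pfx (-1) with
      | some i => (i : Int)
      | none => 0
    else (directions.toList.length : Int)
  idx + 1

-- ===== PRECONDITION & SPEC =====
def Spec_find_basement_position (directions : String) (out : Int) : Prop := out = find_basement_position_alt directions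
instance (directions : String) (out : Int) : Decidable (Spec_find_basement_position directions out) := by unfold Spec_find_basement_position; infer_instance

-- ===== CLAIM (what is proved, stated in full; the proofs are below) =====
def Claim_equal_find_basement_position : Prop := ∀ (directions : String), Dom_find_basement_position directions → Spec_find_basement_position directions (find_basement_position directions)

-- ===== LEMMAS AND PROOFS =====

-- the value B's search step computes, as a function of the remaining deltas and running total
def pvSearch (ds : List Int) (total : Int) : Int :=
  let pfx := pvPrefix ds total
  if (-1 : Int) ∈ pfx then
    match PySem.List.index? pfx (-1) with
    | some i => (i : Int)
    | none => 0
  else (ds.length : Int)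

lemma pvPrefix_length (ds : List Int) (t : Int) : (pvPrefix ds t).length = ds.length := by
  induction ds generalizing t with
  | nil => rfl
  | cons d rest ih => simp [pvPrefix, ih]

lemma pvLoopA_eq (cs : List Char) (dest pos : Int) :
    pvLoopA cs dest pos = pos + pvSearch (pvDeltas cs) dest := by
  induction cs generalizing dest pos with
  | nil => simp [pvLoopA, pvDeltas, pvSearch, pvPrefix]
  | cons c rest ih =>
    have hstep : (if c = ')' then (if c = '(' then dest + 1 else dest) - 1
                  else (if c = '(' then dest + 1 else dest))
        = dest + (if c = '(' then 1 else if c = ')' then -1 else 0) := by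
      by_cases h1 : c = '(' <;> by_cases h2 : c = ')' <;> simp_all <;> ring
    simp only [pvLoopA, pvDeltas, List.map_cons]
    rw [hstep]
    set d := (if c = '(' then (1:Int) else if c = ')' then -1 else 0) with hd
    by_cases hb : dest + d = -1
    · simp only [pvSearch, pvPrefix, hb]
      rw [PySem.List.index?_cons_self]
      simp
    · rw [if_neg hb, ih]
      have key : pvSearch (d :: List.map (fun c => if c = '(' then (1:Int) else if c = ')' then -1 else 0) rest) dest
          = 1 + pvSearch (List.map (fun c => if c = '(' then (1:Int) else if c = ')' then -1 else 0) rest) (dest + d) := by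
        simp only [pvSearch, pvPrefix]
        rw [PySem.List.index?_cons_of_ne _ hb]
        set pfx := pvPrefix (List.map (fun c => if c = '(' then (1:Int) else if c = ')' then -1 else 0) rest) (dest + d) with hpfx
        by_cases hm : (-1 : Int) ∈ pfx
        · obtain ⟨i, hi⟩ := Option.isSome_iff_exists.mp
            ((PySem.List.index?_isSome_iff pfx (-1)).mpr hm)
          rw [hi]
          simp only [List.mem_cons, hm, or_true, if_pos, Option.map_some]
          push_cast; ring
        · have hne : ¬ ((-1:Int) ∈ (dest + d) :: pfx) := by
            simp only [List.mem_cons, not_or]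
            exact ⟨fun h => hb h.symm, hm⟩
          rw [(PySem.List.index?_eq_none_iff pfx (-1)).mpr hm]
          rw [if_neg hne, if_neg hm]
          simp only [List.length_cons]
          push_cast; ring
      rw [show pvDeltas rest = List.map (fun c => if c = '(' then (1:Int) else if c = ')' then -1 else 0) rest from rfl,
          key]
      ring

-- ===== VERDICT (by name: the statement is the Claim_ definition above) =====
theorem find_basement_position_spec : Claim_equal_find_basement_position := by
  intro directions _
  unfold Spec_find_basement_position find_basement_position find_basement_position_alt
  rw [pvLoopA_eq]
  simp only [pvSearch]
  have := pvPrefix_length (pvDeltas directions.toList) 0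
  simp only [pvDeltas, List.length_map] at this
  split_ifs with h
  · simp [pvDeltas]
    split <;> ring
  · simp [pvDeltas]
    ring
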